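-- pv_equiv track=rewrite | github.com/kelr/practice-stuff | ctci/ch8.py | intToSet
-- ===== SOURCE A (Python) =====
-- def intToSet(mask, nums):
--     subset = []
--     i = 0
--     while mask > 0:
--         if (mask & 1) == 1:
--             subset.append(nums[i])
--         i += 1
--         mask >>= 1
--     return subset
-- ===== SOURCE B (Python) =====
-- def intToSet(mask, nums):
--     subset = []
--     while mask > 0:
--         low = mask & -mask
--         subset.append(nums[low.bit_length() - 1])
--         mask -= low
--     return subset
-- ===== Notes on version B (the rewrite author's own statement) =====
-- stated objective: alternative
-- what changed: B extracts set bits directly with lowest-set-bit arithmetic (low = mask & -mask, index via bit_length, clear with mask -= low), visiting only the set bits; A scans every bit position with an index counter and a per-bit conditional shift.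
import Mathlib
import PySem

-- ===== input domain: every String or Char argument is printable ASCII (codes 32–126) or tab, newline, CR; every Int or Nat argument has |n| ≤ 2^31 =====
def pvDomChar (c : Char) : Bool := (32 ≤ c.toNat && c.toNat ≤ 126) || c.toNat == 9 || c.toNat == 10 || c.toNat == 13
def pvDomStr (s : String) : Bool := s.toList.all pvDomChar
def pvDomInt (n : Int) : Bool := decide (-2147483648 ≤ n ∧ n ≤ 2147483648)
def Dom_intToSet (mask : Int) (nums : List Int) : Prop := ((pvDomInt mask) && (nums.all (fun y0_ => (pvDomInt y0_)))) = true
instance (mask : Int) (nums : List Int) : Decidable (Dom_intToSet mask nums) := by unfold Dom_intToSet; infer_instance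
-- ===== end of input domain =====

-- B replaces A's per-bit scan (index counter + conditional + shift at every bit position) by
-- lowest-set-bit extraction: low = mask & -mask, index from low.bit_length() - 1, cleared with
-- mask -= low — only the set bits are visited (no speed claim).

-- ===== PORT A =====
-- termination helper: the shifted mask strictly decreases while it is positive
theorem pvShiftLt (mask : Int) (_h : 0 < mask) : (mask >>> (1:Nat)).toNat < mask.toNat := by
  rw [Int.shiftRight_eq_div_pow]; norm_num; omega

def intToSetGo (mask : Int) (nums : List Int) (i : Nat) (subset : List Int) : List Int :=
  if _h : 0 < mask then
    intToSetGo (mask >>> (1:Nat)) nums (i + 1)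
      (if PySem.Int.band mask 1 == 1 then subset ++ (PySem.List.pyGet? nums (i : Int)).toList else subset)
  else subset
termination_by mask.toNat
decreasing_by exact pvShiftLt mask _h

def intToSet (mask : Int) (nums : List Int) : List Int := intToSetGo mask nums 0 []

-- ===== PORT B =====
-- fuel-based structural recursion (fuel = mask.toNat + 1 bounds the iteration count, since the
-- mask strictly decreases each round); the body is Source B's loop step for step
def intToSetGoB : Nat → Int → List Int → List Int → List Int
  | 0, _, _, subset => subset
  | fuel + 1, mask, nums, subset =>
    if 0 < mask then
      intToSetGoB fuel (mask - PySem.Int.band mask (-mask)) nums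
        (subset ++ (PySem.List.pyGet? nums
          ((PySem.Int.bitLength (PySem.Int.band mask (-mask)) : Int) - 1)).toList)
    else subset

def intToSet_alt (mask : Int) (nums : List Int) : List Int :=
  intToSetGoB (mask.toNat + 1) mask nums []

-- ===== PRECONDITION & SPEC =====
-- Pre_ excludes exactly the inputs where A raises IndexError: a positive mask with a set bit at
-- an index ≥ len(nums); every other input (all mask < 2^len, incl. every nonpositive mask) is admitted.
def Pre_intToSet (mask : Int) (nums : List Int) : Prop := mask < ((2 ^ nums.length : Nat) : Int)
instance (mask : Int) (nums : List Int) : Decidable (Pre_intToSet mask nums) := by unfold Pre_intToSet; infer_instance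
def pvWitness_intToSet : Int × List Int := (5, [10, 20, 30])

def Spec_intToSet (mask : Int) (nums : List Int) (out : List Int) : Prop := out = intToSet_alt mask nums
instance (mask : Int) (nums : List Int) (out : List Int) : Decidable (Spec_intToSet mask nums out) := by unfold Spec_intToSet; infer_instance

-- ===== CLAIM (what is proved, stated in full; the proofs are below) =====
def Claim_equal_intToSet : Prop := ∀ (mask : Int) (nums : List Int), Dom_intToSet mask nums → Pre_intToSet mask nums → Spec_intToSet mask nums (intToSet mask nums)

-- ===== LEMMAS AND PROOFS =====

-- common specification: the sub-list selected by the binary digits of m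
def specF : Nat → List Int → List Int
  | _, [] => []
  | m, x :: xs => (if m % 2 = 1 then [x] else []) ++ specF (m / 2) xs

theorem specF_zero (l : List Int) : specF 0 l = [] := by
  induction l with
  | nil => rfl
  | cons x xs ih => simp [specF, ih]

theorem bandTest (a : Nat) :
    (PySem.Int.band ((a : Int)) 1 == 1) = decide (a % 2 = 1) := by
  have : PySem.Int.band ((a : Int)) 1 = ((a &&& 1 : Nat) : Int) := PySem.Int.band_natCast a 1
  rw [this, Nat.and_one_is_mod]
  by_cases h : a % 2 = 1
  · simp [h]
  · simp [h]; omega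

-- A's loop equals specF on the remaining suffix, when all set bits index into nums
theorem goA_eq (m : Nat) (l : List Int) (i : Nat) (acc : List Int)
    (hm : m < 2 ^ (l.length - i)) :
    intToSetGo (m : Int) l i acc = acc ++ specF m (l.drop i) := by
  induction m using Nat.strong_induction_on generalizing i acc with
  | _ m ih =>
    rw [intToSetGo]
    by_cases hz : 0 < m
    · have hil : i < l.length := by
        by_contra hge
        have : l.length - i = 0 := by omega
        rw [this] at hm; simp at hm; omega
      have hpos : (0 : Int) < (m : Int) := by exact_mod_cast hz
      rw [dif_pos hpos]
      have hget : PySem.List.pyGet? l ((i : Nat) : Int) = some l[i] := by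
        rw [PySem.List.pyGet?_natCast]; simp [hil]
      have hdrop : l.drop i = l[i] :: l.drop (i + 1) := List.drop_eq_getElem_cons hil
      have hshift : ((m : Int) >>> (1 : Nat)) = ((m / 2 : Nat) : Int) := by
        have : ((m : Int) >>> (1 : Nat)) = ((m >>> 1 : Nat) : Int) := by exact_mod_cast rfl
        rw [this]; norm_num [Nat.shiftRight_succ]
      have hm' : m / 2 < 2 ^ (l.length - (i + 1)) := by
        have h1 : l.length - i = (l.length - (i + 1)) + 1 := by omega
        rw [h1, pow_succ] at hm; omega
      rw [hshift, ih (m / 2) (by omega) (i + 1) _ hm']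
      rw [hdrop]
      simp only [bandTest]
      by_cases h : m % 2 = 1 <;> simp [h, hget, specF]
    · have : m = 0 := by omega
      subst this
      rw [dif_neg (by norm_num), specF_zero, List.append_nil]

-- ---- B side: lowest-set-bit arithmetic on Nat ----
def lowN (n : Nat) : Nat := n - (n &&& (n - 1))
def blN (n : Nat) : Nat := PySem.Int.bitLength (n : Int)

theorem and_pred_odd (k : Nat) : (2 * k + 1) &&& (2 * k) = 2 * k := by
  apply Nat.eq_of_testBit_eq
  intro i
  cases i with
  | zero => simp [Nat.testBit_zero]
  | succ j =>
    rw [Nat.testBit_and]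
    simp only [Nat.testBit_succ]
    have h1 : (2 * k + 1) / 2 = k := by omega
    have h2 : (2 * k) / 2 = k := by omega
    rw [h1, h2, Bool.and_self]

theorem and_pred_even (k : Nat) (h : 0 < k) :
    (2 * k) &&& (2 * k - 1) = 2 * (k &&& (k - 1)) := by
  apply Nat.eq_of_testBit_eq
  intro i
  cases i with
  | zero => simp [Nat.testBit_zero]
  | succ j =>
    rw [Nat.testBit_and]
    simp only [Nat.testBit_succ]
    have h1 : (2 * k) / 2 = k := by omega
    have h2 : (2 * k - 1) / 2 = k - 1 := by omega
    have h3 : (2 * (k &&& (k - 1))) / 2 = k &&& (k - 1) := by omega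
    rw [h1, h2, h3, Nat.testBit_and]

theorem lowN_odd (k : Nat) : lowN (2 * k + 1) = 1 := by
  unfold lowN
  have : 2 * k + 1 - 1 = 2 * k := by omega
  rw [this, and_pred_odd]; omega

theorem lowN_even (k : Nat) (h : 0 < k) : lowN (2 * k) = 2 * lowN k := by
  unfold lowN
  rw [and_pred_even k h]
  have := Nat.and_le_left (n := k) (m := k - 1)
  omega

theorem lowN_pos (n : Nat) (h : 0 < n) : 0 < lowN n := by
  induction n using Nat.strong_induction_on with
  | _ n ih =>
    rcases Nat.even_or_odd n with ⟨k, hk⟩ | ⟨k, hk⟩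
    · subst hk
      rw [(by ring : k + k = 2 * k), lowN_even k (by omega)]
      have := ih k (by omega) (by omega)
      omega
    · subst hk
      rw [lowN_odd]; omega

theorem lowN_le (n : Nat) : lowN n ≤ n := by unfold lowN; omega

theorem blN_one : blN 1 = 1 := by decide

theorem blN_double (m : Nat) (h : 0 < m) : blN (2 * m) = blN m + 1 := by
  unfold blN
  rw [PySem.Int.bitLength_natCast (m := 2 * m) (by omega)]
  have : (2 * m) / 2 = m := by omega
  rw [this]

theorem blN_pos (n : Nat) (h : 0 < n) : 0 < blN n := by
  unfold blN
  rw [PySem.Int.bitLength_natCast (m := n) h]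
  omega

-- the step a B iteration takes, expressed on specF
theorem stepSpec (m : Nat) (l : List Int) (h : 0 < m) (hm : m < 2 ^ l.length) :
    blN (lowN m) - 1 < l.length ∧
    specF m l = l.getD (blN (lowN m) - 1) 0 :: specF (m - lowN m) l := by
  induction m using Nat.strong_induction_on generalizing l with
  | _ m ih =>
    have hl : l ≠ [] := by
      intro he; subst he; simp at hm; omega
    obtain ⟨x, xs, rfl⟩ := List.exists_cons_of_ne_nil hl
    rcases Nat.even_or_odd m with ⟨k, hk⟩ | ⟨k, hk⟩
    · -- even: m = 2k, k > 0
      have hk2 : m = 2 * k := by omega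
      have hkpos : 0 < k := by omega
      have hxs : k < 2 ^ xs.length := by
        simp [pow_succ] at hm; omega
      obtain ⟨ihlt, iheq⟩ := ih k (by omega) xs hkpos hxs
      have hlow : lowN m = 2 * lowN k := by rw [hk2]; exact lowN_even k hkpos
      have hidx : blN (lowN m) - 1 = (blN (lowN k) - 1) + 1 := by
        rw [hlow, blN_double _ (lowN_pos k hkpos)]
        have := blN_pos (lowN k) (lowN_pos k hkpos)
        omega
      constructor
      · rw [hidx]; simpa using ihlt
      · have d1 : (2 * k) % 2 = 0 := by omega
        have d2 : (2 * k) / 2 = k := by omega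
        have e1 : specF m (x :: xs) = specF k xs := by
          rw [hk2]; simp [specF, d1, d2]
        have e2 : specF (m - lowN m) (x :: xs) = specF (k - lowN k) xs := by
          have hle := lowN_le k
          have hv : m - lowN m = 2 * (k - lowN k) := by rw [hlow, hk2]; omega
          have d3 : (2 * (k - lowN k)) % 2 = 0 := by omega
          have d4 : (2 * (k - lowN k)) / 2 = k - lowN k := by omega
          rw [hv]; simp [specF, d3, d4]
        rw [e1, e2, iheq, hidx]
        simp
    · -- odd: m = 2k+1
      have hk2 : m = 2 * k + 1 := by omega
      have hlow : lowN m = 1 := by rw [hk2]; exact lowN_odd k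
      constructor
      · rw [hlow, blN_one]; simp
      · rw [hlow, blN_one]
        have d1 : (2 * k + 1) % 2 = 1 := by omega
        have d2 : (2 * k + 1) / 2 = k := by omega
        have e1 : specF m (x :: xs) = x :: specF k xs := by
          rw [hk2]; simp [specF, d1, d2]
        have e2 : specF (m - 1) (x :: xs) = specF k xs := by
          have hv : m - 1 = 2 * k := by omega
          have d3 : (2 * k) % 2 = 0 := by omega
          have d4 : (2 * k) / 2 = k := by omega
          rw [hv]; simp [specF, d3, d4]
        rw [e1, e2]; simp

-- computing B's 'low' on a nonnegative mask
theorem band_neg_self (n : Nat) (h : 0 < n) :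
    PySem.Int.band (n : Int) (-(n : Int)) = ((lowN n : Nat) : Int) := by
  unfold PySem.Int.band
  rw [if_pos (by positivity), if_neg (by omega)]
  have h2 : (-(-(n : Int)) - 1).toNat = n - 1 := by omega
  have h3 : ((n : Int)).toNat = n := by omega
  rw [h2, h3]
  unfold lowN
  rfl

-- B's loop equals specF when all set bits index into nums and the fuel covers the mask
theorem goB_eq (fuel m : Nat) (l : List Int) (acc : List Int)
    (hm : m < 2 ^ l.length) (hf : m ≤ fuel) :
    intToSetGoB fuel (m : Int) l acc = acc ++ specF m l := by
  induction fuel generalizing m acc with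
  | zero =>
    have : m = 0 := by omega
    subst this
    rw [intToSetGoB, specF_zero, List.append_nil]
  | succ fuel ih =>
    rw [intToSetGoB]
    by_cases hz : 0 < m
    · rw [if_pos (by exact_mod_cast hz)]
      obtain ⟨hlt, heq⟩ := stepSpec m l hz hm
      have hlowpos := lowN_pos m hz
      have hblpos := blN_pos (lowN m) hlowpos
      have hlow := band_neg_self m hz
      have hidx : ((PySem.Int.bitLength ((lowN m : Nat) : Int) : Int) - 1)
          = (((blN (lowN m) - 1 : Nat) : Nat) : Int) := by
        unfold blN at hblpos ⊢; omega
      have hget : PySem.List.pyGet? l (((blN (lowN m) - 1 : Nat) : Nat) : Int)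
          = some (l.getD (blN (lowN m) - 1) 0) := by
        rw [PySem.List.pyGet?_natCast]
        simp [hlt]
      have hsub : ((m : Int) - ((lowN m : Nat) : Int)) = ((m - lowN m : Nat) : Int) := by
        have := lowN_le m; omega
      simp only [hlow, hidx, hget, hsub]
      rw [ih (m - lowN m) _ (by have := lowN_le m; omega) (by omega)]
      rw [heq]; simp
    · have : m = 0 := by omega
      subst this
      rw [if_neg (by norm_num), specF_zero, List.append_nil]

-- ===== VERDICT (by name: the statement is the Claim_ definition above) =====
theorem intToSet_spec : Claim_equal_intToSet := by
  intro mask nums _ hpre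
  unfold Spec_intToSet intToSet intToSet_alt
  by_cases hm : mask ≤ 0
  · rw [intToSetGo, dif_neg (by omega), intToSetGoB, if_neg (by omega)]
  · have hcast : mask = ((mask.toNat : Nat) : Int) := by omega
    have hlt : mask.toNat < 2 ^ nums.length := by
      unfold Pre_intToSet at hpre
      generalize 2 ^ nums.length = P at hpre ⊢
      omega
    conv_lhs => rw [hcast, goA_eq mask.toNat nums 0 [] (by simpa using hlt)]
    conv_rhs => rw [hcast]
    have htn : ((mask.toNat : Nat) : Int).toNat = mask.toNat := by omega
    rw [htn, goB_eq (mask.toNat + 1) mask.toNat nums [] hlt (by omega)]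
    simp
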